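-- pv_equiv track=rewrite | github.com/miliar/Code_Jam_Webscraper | solutions_python/solutions_year15_round0_nr1/1782.py | f
-- ===== SOURCE A (Python) =====
-- def f(n, s):
--     n = int(n)
--     A = list(map(int, list(s)))
--     ans = 0
--     claps = 0
--     n = len(A)
--     for i in range(n):
--         if claps < i:
--             x = i - claps
--             ans += x
--             claps += x
--         claps += A[i]
--     return ans
-- ===== SOURCE B (Python) =====
-- def f(n, s):
--     n = int(n)
--     A = list(map(int, s))
--     prefixes = []
--     run = 0
--     for d in A:
--         prefixes.append(run)
--         run += d
--     deficits = [i - p for i, p in enumerate(prefixes)]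
--     return max(deficits, default=0)
-- ===== Notes on version B (the rewrite author's own statement) =====
-- stated objective: alternative
-- what changed: A's single clamped-accumulator pass with a conditional correction branch is replaced by three staged passes: build the list of prefix digit-sums, map it to a deficit list i - prefix[i], and take its maximum (default 0); no running answer or branch is maintained.
import Mathlib
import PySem

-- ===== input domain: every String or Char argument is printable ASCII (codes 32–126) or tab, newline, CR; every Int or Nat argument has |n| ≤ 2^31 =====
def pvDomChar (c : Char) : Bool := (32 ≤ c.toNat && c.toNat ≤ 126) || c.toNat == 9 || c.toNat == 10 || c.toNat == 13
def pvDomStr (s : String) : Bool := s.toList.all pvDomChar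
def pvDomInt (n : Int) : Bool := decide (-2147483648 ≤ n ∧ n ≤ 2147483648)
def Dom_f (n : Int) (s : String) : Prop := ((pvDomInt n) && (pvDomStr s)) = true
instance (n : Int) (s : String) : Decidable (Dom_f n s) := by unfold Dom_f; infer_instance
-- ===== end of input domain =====

-- B replaces A's single clamped-accumulator pass (with its conditional correction branch)
-- by staged passes: prefix-sum list, deficit list, then max with default 0 (objective: alternative).

-- ===== PORT A =====
def f (n : Int) (s : String) : Int :=
  let _n : Int := n  -- n = int(n): identity on an int argument
  -- A = list(map(int, list(s)));  int(c) = PySem.Int.ofChars? [c]; Pre_f excludes the ValueError (none) case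
  let A : List Int := s.toList.map (fun c => (PySem.Int.ofChars? [c]).getD 0)
  let n2 : Int := (A.length : Int)
  let st : Int × Int :=
    (PySem.List.pyRange 0 n2 1).foldl
      (fun (p : Int × Int) (i : Int) =>
        let p' : Int × Int := if p.2 < i then (p.1 + (i - p.2), p.2 + (i - p.2)) else p
        (p'.1, p'.2 + PySem.List.pyGetD A i 0))
      (0, 0)
  st.1

-- ===== PORT B =====
def f_alt (n : Int) (s : String) : Int :=
  let _n : Int := n
  let A : List Int := s.toList.map (fun c => (PySem.Int.ofChars? [c]).getD 0)
  -- pass 1: prefixes = []; run = 0; for d in A: prefixes.append(run); run += d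
  let prefixes : List Int :=
    (A.foldl (fun (st : List Int × Int) d => (st.1 ++ [st.2], st.2 + d)) ([], 0)).1
  -- pass 2: deficits = [i - p for i, p in enumerate(prefixes)]
  let deficits : List Int := (PySem.List.enumerate prefixes 0).map (fun ip => ip.1 - ip.2)
  -- pass 3: max(deficits, default=0)
  (PySem.List.max? deficits (fun x => x)).getD 0

-- ===== PRECONDITION & SPEC =====
-- Pre_f: every character of s is a decimal digit; otherwise int(c) raises ValueError in A (and in B).
def Pre_f (n : Int) (s : String) : Prop := s.toList.all (fun c => '0' ≤ c ∧ c ≤ '9')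
instance (n : Int) (s : String) : Decidable (Pre_f n s) := by unfold Pre_f; infer_instance
def pvWitness_f : Int × String := (3, "12045")
def Spec_f (n : Int) (s : String) (out : Int) : Prop := out = f_alt n s
instance (n : Int) (s : String) (out : Int) : Decidable (Spec_f n s out) := by unfold Spec_f; infer_instance

-- ===== CLAIM (what is proved, stated in full; the proofs are below) =====
def Claim_equal_f : Prop := ∀ (n : Int) (s : String), Dom_f n s → Pre_f n s → Spec_f n s (f n s)

-- ===== LEMMAS AND PROOFS =====

-- A's step and an intermediate running-max step over (index, digit) pairs
def stepA (p : Int × Int) (id : Int × Int) : Int × Int :=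
  let p' : Int × Int := if p.2 < id.1 then (p.1 + (id.1 - p.2), p.2 + (id.1 - p.2)) else p
  (p'.1, p'.2 + id.2)

def stepB (p : Int × Int) (id : Int × Int) : Int × Int :=
  (max p.1 (id.1 - p.2), p.2 + id.2)

-- specification lists: prefix sums of the digits, and the deficits k - prefix
def prefList : List Int → Int → List Int
  | [], _ => []
  | d :: t, run => run :: prefList t (run + d)

def defList : List Int → Int → Int → List Int
  | [], _, _ => []
  | d :: t, k, p => (k - p) :: defList t (k + 1) (p + d)

-- invariant: A's state is (ans, prefix + ans) when the running-max state is (ans, prefix)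
theorem key (L : List (Int × Int)) (ans pre : Int) :
    (L.foldl stepA (ans, pre + ans)).1 = (L.foldl stepB (ans, pre)).1 := by
  induction L generalizing ans pre with
  | nil => simp
  | cons hd tl ih =>
    simp only [List.foldl_cons]
    by_cases h : pre + ans < hd.1
    · have e1 : stepA (ans, pre + ans) hd = (hd.1 - pre, (pre + hd.2) + (hd.1 - pre)) := by
        simp [stepA, h, Prod.ext_iff] <;> omega
      have e2 : stepB (ans, pre) hd = (hd.1 - pre, pre + hd.2) := by
        simp [stepB]; omega
      rw [e1, e2, ih]
    · have e1 : stepA (ans, pre + ans) hd = (ans, (pre + hd.2) + ans) := by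
        simp [stepA, h, Prod.ext_iff] <;> omega
      have e2 : stepB (ans, pre) hd = (ans, pre + hd.2) := by
        simp [stepB]; omega
      rw [e1, e2, ih]

-- A's fold over range(n) with A[i] equals the fold over enumerate(A)
theorem f_eq_foldA (n : Int) (s : String) :
    f n s = ((PySem.List.enumerate
        (s.toList.map (fun c => (PySem.Int.ofChars? [c]).getD 0)) 0).foldl stepA (0, 0)).1 := by
  unfold f
  rw [PySem.List.enumerate_eq_map_pyRange (d := 0), List.foldl_map]
  simp [stepA]

-- the running-max fold computes the straight maximum of the deficit list
theorem foldB_eq_max (A : List Int) (k a p : Int) :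
    ((PySem.List.enumerate A k).foldl stepB (a, p)).1 = (defList A k p).foldl max a := by
  induction A generalizing k a p with
  | nil => simp [defList]
  | cons d t ih =>
    rw [PySem.List.enumerate_cons, List.foldl_cons]
    simpa [stepB, defList] using ih (k + 1) (max a (k - p)) (p + d)

-- B's first pass builds exactly prefList
theorem fold_prefList (A : List Int) (acc : List Int) (run : Int) :
    (A.foldl (fun (st : List Int × Int) d => (st.1 ++ [st.2], st.2 + d)) (acc, run)).1
      = acc ++ prefList A run := by
  induction A generalizing acc run with
  | nil => simp [prefList]
  | cons d t ih => simp [prefList, ih]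

-- B's second pass turns prefList into defList
theorem enum_defList (A : List Int) (k run : Int) :
    (PySem.List.enumerate (prefList A run) k).map (fun ip => ip.1 - ip.2)
      = defList A k run := by
  induction A generalizing k run with
  | nil => simp [prefList, defList]
  | cons d t ih =>
    rw [prefList, PySem.List.enumerate_cons, List.map_cons, defList, ih]

-- max with default 0 equals a running max from 0, since the first deficit is 0
theorem max_defList (A : List Int) :
    (PySem.List.max? (defList A 0 0) (fun x => x)).getD 0 = (defList A 0 0).foldl max 0 := by
  cases A with
  | nil => simp [defList, PySem.List.max?]
  | cons d t =>
    rw [defList, PySem.List.max?_id_cons]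
    simp

-- ===== VERDICT (by name: the statement is the Claim_ definition above) =====
theorem f_spec : Claim_equal_f := by
  intro n s _ _
  unfold Spec_f
  rw [f_eq_foldA]
  have hk := key (PySem.List.enumerate
      (s.toList.map (fun c => (PySem.Int.ofChars? [c]).getD 0)) 0) 0 0
  simp only [zero_add] at hk
  rw [hk, foldB_eq_max]
  simp only [f_alt, fold_prefList, List.nil_append, enum_defList, max_defList]
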